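-- pv_equiv track=rewrite | github.com/cheolwanpark/vectorizer-experiments | emulator/benchmarks/TSVC_2/scripts/generate_loops.py | assemble_file
-- ===== SOURCE A (Python) =====
-- import textwrap
-- from typing import Dict, Iterable, List, Tuple
--
-- def render_prepare_fn(loop: str) -> str:
--     common = {
--         "s162",
--         "s171",
--         "s175",
--         "s318",
--     }
--     n1_n3_struct = {"s122", "s172"}
--     s1_only = {"s272", "s2710", "s332", "vpvts"}
--     ip_direct = {"s353", "s491", "s4113", "s4115", "vag", "vas"}
--
--     if loop in n1_n3_struct:
--         body = """\
-- static struct {int a; int b;} args;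
-- args.a = tsvc_n1;
-- args.b = tsvc_n3;
-- return &args;"""
--     elif loop in common:
--         body = "return &tsvc_n1;"
--     elif loop == "s174":
--         body = "static struct {int a;} args = {LEN_1D/2};\nreturn &args;"
--     elif loop == "s242":
--         body = """\
-- static struct {real_t a; real_t b;} args;
-- args.a = tsvc_s1;
-- args.b = tsvc_s2;
-- return &args;"""
--     elif loop in s1_only:
--         body = "return &tsvc_s1;"
--     elif loop == "s4112":
--         body = """\
-- static struct {int *a; real_t b;} args;
-- args.a = tsvc_ip;
-- args.b = tsvc_s1;
-- return &args;"""
--     elif loop == "s4114":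
--         body = """\
-- static struct {int *a; int b;} args;
-- args.a = tsvc_ip;
-- args.b = tsvc_n1;
-- return &args;"""
--     elif loop == "s4116":
--         body = """\
-- static struct {int *a; int b; int c;} args;
-- args.a = tsvc_ip;
-- args.b = LEN_2D/2;
-- args.c = tsvc_n1;
-- return &args;"""
--     elif loop in ip_direct:
--         body = "return tsvc_ip;"
--     else:
--         body = "return NULL;"
--
--     return "void *tsvc_prepare_args(void) {\n" + textwrap.indent(body, "    ") + "\n}\n"
--
-- def assemble_file(
--     loop: str,
--     func_src: str,
--     helpers: Iterable[str],
-- ) -> str: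
--     header = textwrap.dedent(
--         """\
--         #include <math.h>
--         #include "../common.h"
--         #include "../array_defs.h"
--         #include "../single_support.h"
--         #include "../tsvc_measure.h"
--
--         """
--     )
--
--     pieces: List[str] = [header]
--     pieces.extend(h for h in helpers if h)
--     if pieces[-1].strip():
--         pieces.append("\n")
--     pieces.append(func_src.strip() + "\n\n")
--     pieces.append(f'const char *tsvc_loop_name(void) {{ return "{loop}"; }}\n\n')
--     pieces.append(f"real_t tsvc_entry(struct args_t *func_args) {{ return {loop}(func_args); }}\n\n")
--     pieces.append(render_prepare_fn(loop))
--     return "".join(pieces)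
-- ===== SOURCE B (Python) =====
-- # B: generative re-implementation -- prepare-function bodies are GENERATED from a
-- # small structured spec (return expression, or struct field types+values) instead
-- # of stored/selected as literal text; the file is one flat f-string concatenation.
--
-- _HEADER = (
--     '#include <math.h>\n'
--     '#include "../common.h"\n'
--     '#include "../array_defs.h"\n'
--     '#include "../single_support.h"\n'
--     '#include "../tsvc_measure.h"\n'
--     '\n'
-- )
--
-- # loops whose prepare function just returns an expression
-- _RET = {}
-- for _n in ("s162", "s171", "s175", "s318"):
--     _RET[_n] = "&tsvc_n1"
-- for _n in ("s272", "s2710", "s332", "vpvts"):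
--     _RET[_n] = "&tsvc_s1"
-- for _n in ("s353", "s491", "s4113", "s4115", "vag", "vas"):
--     _RET[_n] = "tsvc_ip"
--
-- # loops needing a static args struct: (field types, field values, use initializer)
-- _STRUCT = {
--     "s122":  (["int", "int"], ["tsvc_n1", "tsvc_n3"], False),
--     "s172":  (["int", "int"], ["tsvc_n1", "tsvc_n3"], False),
--     "s174":  (["int"], ["LEN_1D/2"], True),
--     "s242":  (["real_t", "real_t"], ["tsvc_s1", "tsvc_s2"], False),
--     "s4112": (["int *", "real_t"], ["tsvc_ip", "tsvc_s1"], False),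
--     "s4114": (["int *", "int"], ["tsvc_ip", "tsvc_n1"], False),
--     "s4116": (["int *", "int", "int"], ["tsvc_ip", "LEN_2D/2", "tsvc_n1"], False),
-- }
--
-- def _field(t, i):
--     return t + ("" if t.endswith("*") else " ") + chr(97 + i)
--
-- def _prepare_fn(loop):
--     if loop in _STRUCT:
--         types, values, init = _STRUCT[loop]
--         decl = "static struct {" + "; ".join(_field(t, i) for i, t in enumerate(types)) + ";} args"
--         if init:
--             lines = [decl + " = {" + ", ".join(values) + "};"]
--         else:
--             lines = [decl + ";"]
--             lines += ["args.%c = %s;" % (chr(97 + i), v) for i, v in enumerate(values)]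
--         lines.append("return &args;")
--     else:
--         lines = ["return %s;" % _RET.get(loop, "NULL")]
--     return ("void *tsvc_prepare_args(void) {\n"
--             + "".join("    " + ln + "\n" for ln in lines)
--             + "}\n")
--
-- def assemble_file(loop, func_src, helpers):
--     kept = [h for h in helpers if h]
--     tail = kept[-1] if kept else _HEADER
--     glue = "\n" if tail.strip() else ""
--     return (_HEADER
--             + "".join(kept)
--             + glue
--             + func_src.strip() + "\n\n"
--             + f'const char *tsvc_loop_name(void) {{ return "{loop}"; }}\n\n'
--             + f"real_t tsvc_entry(struct args_t *func_args) {{ return {loop}(func_args); }}\n\n"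
--             + _prepare_fn(loop))
-- ===== Notes on version B (the rewrite author's own statement) =====
-- stated objective: alternative
-- what changed: Instead of selecting one of nine stored literal body strings through a membership if/elif chain, B keeps a small structured spec per loop (a return expression, or the struct's field types and values) and GENERATES each prepare-function body line by line from that spec (field names chr(97+i), declaration/assignment/initializer lines computed); the pieces-list append/join assembly becomes one flat string concatenation.
import Mathlib
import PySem

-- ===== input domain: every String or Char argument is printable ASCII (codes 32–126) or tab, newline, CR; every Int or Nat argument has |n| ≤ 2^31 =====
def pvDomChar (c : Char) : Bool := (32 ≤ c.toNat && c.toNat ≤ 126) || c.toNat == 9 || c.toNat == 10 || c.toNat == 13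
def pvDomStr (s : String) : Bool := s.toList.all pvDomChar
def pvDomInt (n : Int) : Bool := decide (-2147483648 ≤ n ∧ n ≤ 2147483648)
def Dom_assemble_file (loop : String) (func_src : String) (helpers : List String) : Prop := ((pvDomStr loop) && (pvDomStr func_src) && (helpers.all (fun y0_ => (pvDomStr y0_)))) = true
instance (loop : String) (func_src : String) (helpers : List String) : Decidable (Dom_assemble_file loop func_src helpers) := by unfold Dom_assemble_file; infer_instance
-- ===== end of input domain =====

-- B GENERATES each prepare-function body from a structured spec (return expression,
-- or struct field types+values) instead of selecting stored literal text through a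
-- membership if/elif chain (objective: alternative; same cost).

-- ===== PORT A =====
-- textwrap.indent(body, "    "): exact for bodies with no '\r' and no whitespace-only
-- lines (true for every body passed to it here).
def pyIndent4 (s : String) : String :=
  String.ofList ([' ', ' ', ' ', ' '] ++ s.toList.flatMap (fun c => if c = '\n' then ['\n', ' ', ' ', ' ', ' '] else [c]))

def render_prepare_fn (loop : String) : String :=
  let common : PySem.Set String := PySem.Set.ofList ["s162", "s171", "s175", "s318"]
  let n1_n3_struct : PySem.Set String := PySem.Set.ofList ["s122", "s172"]
  let s1_only : PySem.Set String := PySem.Set.ofList ["s272", "s2710", "s332", "vpvts"]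
  let ip_direct : PySem.Set String := PySem.Set.ofList ["s353", "s491", "s4113", "s4115", "vag", "vas"]
  let body : String :=
    if PySem.Set.contains n1_n3_struct loop then
      "static struct {int a; int b;} args;\nargs.a = tsvc_n1;\nargs.b = tsvc_n3;\nreturn &args;"
    else if PySem.Set.contains common loop then
      "return &tsvc_n1;"
    else if loop = "s174" then
      "static struct {int a;} args = {LEN_1D/2};\nreturn &args;"
    else if loop = "s242" then
      "static struct {real_t a; real_t b;} args;\nargs.a = tsvc_s1;\nargs.b = tsvc_s2;\nreturn &args;"
    else if PySem.Set.contains s1_only loop then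
      "return &tsvc_s1;"
    else if loop = "s4112" then
      "static struct {int *a; real_t b;} args;\nargs.a = tsvc_ip;\nargs.b = tsvc_s1;\nreturn &args;"
    else if loop = "s4114" then
      "static struct {int *a; int b;} args;\nargs.a = tsvc_ip;\nargs.b = tsvc_n1;\nreturn &args;"
    else if loop = "s4116" then
      "static struct {int *a; int b; int c;} args;\nargs.a = tsvc_ip;\nargs.b = LEN_2D/2;\nargs.c = tsvc_n1;\nreturn &args;"
    else if PySem.Set.contains ip_direct loop then
      "return tsvc_ip;"
    else
      "return NULL;"
  "void *tsvc_prepare_args(void) {\n" ++ pyIndent4 body ++ "\n}\n"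

-- textwrap.dedent(header literal) written out already dedented (it is a constant)
def pvHeaderA : String := "#include <math.h>\n#include \"../common.h\"\n#include \"../array_defs.h\"\n#include \"../single_support.h\"\n#include \"../tsvc_measure.h\"\n\n"

def assemble_file (loop : String) (func_src : String) (helpers : List String) : String :=
  let pieces : List String := [pvHeaderA] ++ helpers.filter (fun h => h ≠ "")
  let pieces : List String :=
    if PySem.Str.strip (PySem.List.pyGetD pieces (-1) "") ≠ "" then pieces ++ ["\n"] else pieces
  let pieces := pieces ++ [PySem.Str.strip func_src ++ "\n\n"]
  let pieces := pieces ++ ["const char *tsvc_loop_name(void) { return \"" ++ loop ++ "\"; }\n\n"]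
  let pieces := pieces ++ ["real_t tsvc_entry(struct args_t *func_args) { return " ++ loop ++ "(func_args); }\n\n"]
  let pieces := pieces ++ [render_prepare_fn loop]
  PySem.Str.join "" pieces

-- ===== PORT B =====
def pvHeaderB : String := "#include <math.h>\n#include \"../common.h\"\n#include \"../array_defs.h\"\n#include \"../single_support.h\"\n#include \"../tsvc_measure.h\"\n\n"

-- _RET: loops whose prepare function just returns an expression
def pvRet : PySem.Dict String String :=
  let d := ["s162", "s171", "s175", "s318"].foldl (fun d n => d.insert n "&tsvc_n1") PySem.Dict.empty
  let d := ["s272", "s2710", "s332", "vpvts"].foldl (fun d n => d.insert n "&tsvc_s1") d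
  let d := ["s353", "s491", "s4113", "s4115", "vag", "vas"].foldl (fun d n => d.insert n "tsvc_ip") d
  d

-- _STRUCT: (field types, field values, use initializer)
def pvStruct : PySem.Dict String (List String × List String × Bool) :=
  PySem.Dict.ofList
    [("s122", (["int", "int"], ["tsvc_n1", "tsvc_n3"], false)),
     ("s172", (["int", "int"], ["tsvc_n1", "tsvc_n3"], false)),
     ("s174", (["int"], ["LEN_1D/2"], true)),
     ("s242", (["real_t", "real_t"], ["tsvc_s1", "tsvc_s2"], false)),
     ("s4112", (["int *", "real_t"], ["tsvc_ip", "tsvc_s1"], false)),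
     ("s4114", (["int *", "int"], ["tsvc_ip", "tsvc_n1"], false)),
     ("s4116", (["int *", "int", "int"], ["tsvc_ip", "LEN_2D/2", "tsvc_n1"], false))]

def pvField (t : String) (i : Int) : String :=
  t ++ (if PySem.Str.endswith t "*" then "" else " ") ++ String.singleton (Char.ofNat (97 + i.toNat))

def pvPrepareFn (loop : String) : String :=
  let lines : List String :=
    match pvStruct.get? loop with
    | some (types, values, init) =>
      let decl := "static struct {" ++ PySem.Str.join "; " ((PySem.List.enumerate types).map (fun p => pvField p.2 p.1)) ++ ";} args"
      (if init then
        [decl ++ " = {" ++ PySem.Str.join ", " values ++ "};"]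
      else
        [decl ++ ";"] ++ (PySem.List.enumerate values).map (fun p => "args." ++ String.singleton (Char.ofNat (97 + p.1.toNat)) ++ " = " ++ p.2 ++ ";"))
      ++ ["return &args;"]
    | none => ["return " ++ pvRet.getD loop "NULL" ++ ";"]
  "void *tsvc_prepare_args(void) {\n" ++ PySem.Str.join "" (lines.map (fun ln => "    " ++ ln ++ "\n")) ++ "}\n"

def assemble_file_alt (loop : String) (func_src : String) (helpers : List String) : String :=
  let kept : List String := helpers.filter (fun h => h ≠ "")
  let tail : String := kept.getLastD pvHeaderB
  let glue : String := if PySem.Str.strip tail ≠ "" then "\n" else ""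
  pvHeaderB ++ PySem.Str.join "" kept ++ glue ++ PySem.Str.strip func_src ++ "\n\n" ++
    "const char *tsvc_loop_name(void) { return \"" ++ loop ++ "\"; }\n\n" ++
    "real_t tsvc_entry(struct args_t *func_args) { return " ++ loop ++ "(func_args); }\n\n" ++
    pvPrepareFn loop

-- ===== PRECONDITION & SPEC =====
def Spec_assemble_file (loop : String) (func_src : String) (helpers : List String) (out : String) : Prop := out = assemble_file_alt loop func_src helpers
instance (loop : String) (func_src : String) (helpers : List String) (out : String) : Decidable (Spec_assemble_file loop func_src helpers out) := by unfold Spec_assemble_file; infer_instance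

-- ===== CLAIM (what is proved, stated in full; the proofs are below) =====
def Claim_equal_assemble_file : Prop := ∀ (loop : String) (func_src : String) (helpers : List String), Dom_assemble_file loop func_src helpers → Spec_assemble_file loop func_src helpers (assemble_file loop func_src helpers)

-- ===== LEMMAS AND PROOFS =====
def pvKeys : List String := ["s122", "s172", "s162", "s171", "s175", "s318", "s272", "s2710", "s332", "vpvts", "s353", "s491", "s4113", "s4115", "vag", "vas", "s174", "s242", "s4112", "s4114", "s4116"]

set_option maxRecDepth 40000 in
set_option maxHeartbeats 4000000 in
theorem prep_eq (loop : String) : pvPrepareFn loop = render_prepare_fn loop := by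
  by_cases h : loop ∈ pvKeys
  · simp [pvKeys] at h
    rcases h with h|h|h|h|h|h|h|h|h|h|h|h|h|h|h|h|h|h|h|h|h <;> subst h
    · exact (show pvPrepareFn "s122" = "void *tsvc_prepare_args(void) {\n    static struct {int a; int b;} args;\n    args.a = tsvc_n1;\n    args.b = tsvc_n3;\n    return &args;\n}\n" by decide).trans (show render_prepare_fn "s122" = "void *tsvc_prepare_args(void) {\n    static struct {int a; int b;} args;\n    args.a = tsvc_n1;\n    args.b = tsvc_n3;\n    return &args;\n}\n" by decide).symm
    · exact (show pvPrepareFn "s172" = "void *tsvc_prepare_args(void) {\n    static struct {int a; int b;} args;\n    args.a = tsvc_n1;\n    args.b = tsvc_n3;\n    return &args;\n}\n" by decide).trans (show render_prepare_fn "s172" = "void *tsvc_prepare_args(void) {\n    static struct {int a; int b;} args;\n    args.a = tsvc_n1;\n    args.b = tsvc_n3;\n    return &args;\n}\n" by decide).symm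
    · exact (show pvPrepareFn "s162" = "void *tsvc_prepare_args(void) {\n    return &tsvc_n1;\n}\n" by decide).trans (show render_prepare_fn "s162" = "void *tsvc_prepare_args(void) {\n    return &tsvc_n1;\n}\n" by decide).symm
    · exact (show pvPrepareFn "s171" = "void *tsvc_prepare_args(void) {\n    return &tsvc_n1;\n}\n" by decide).trans (show render_prepare_fn "s171" = "void *tsvc_prepare_args(void) {\n    return &tsvc_n1;\n}\n" by decide).symm
    · exact (show pvPrepareFn "s175" = "void *tsvc_prepare_args(void) {\n    return &tsvc_n1;\n}\n" by decide).trans (show render_prepare_fn "s175" = "void *tsvc_prepare_args(void) {\n    return &tsvc_n1;\n}\n" by decide).symm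
    · exact (show pvPrepareFn "s318" = "void *tsvc_prepare_args(void) {\n    return &tsvc_n1;\n}\n" by decide).trans (show render_prepare_fn "s318" = "void *tsvc_prepare_args(void) {\n    return &tsvc_n1;\n}\n" by decide).symm
    · exact (show pvPrepareFn "s272" = "void *tsvc_prepare_args(void) {\n    return &tsvc_s1;\n}\n" by decide).trans (show render_prepare_fn "s272" = "void *tsvc_prepare_args(void) {\n    return &tsvc_s1;\n}\n" by decide).symm
    · exact (show pvPrepareFn "s2710" = "void *tsvc_prepare_args(void) {\n    return &tsvc_s1;\n}\n" by decide).trans (show render_prepare_fn "s2710" = "void *tsvc_prepare_args(void) {\n    return &tsvc_s1;\n}\n" by decide).symm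
    · exact (show pvPrepareFn "s332" = "void *tsvc_prepare_args(void) {\n    return &tsvc_s1;\n}\n" by decide).trans (show render_prepare_fn "s332" = "void *tsvc_prepare_args(void) {\n    return &tsvc_s1;\n}\n" by decide).symm
    · exact (show pvPrepareFn "vpvts" = "void *tsvc_prepare_args(void) {\n    return &tsvc_s1;\n}\n" by decide).trans (show render_prepare_fn "vpvts" = "void *tsvc_prepare_args(void) {\n    return &tsvc_s1;\n}\n" by decide).symm
    · exact (show pvPrepareFn "s353" = "void *tsvc_prepare_args(void) {\n    return tsvc_ip;\n}\n" by decide).trans (show render_prepare_fn "s353" = "void *tsvc_prepare_args(void) {\n    return tsvc_ip;\n}\n" by decide).symm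
    · exact (show pvPrepareFn "s491" = "void *tsvc_prepare_args(void) {\n    return tsvc_ip;\n}\n" by decide).trans (show render_prepare_fn "s491" = "void *tsvc_prepare_args(void) {\n    return tsvc_ip;\n}\n" by decide).symm
    · exact (show pvPrepareFn "s4113" = "void *tsvc_prepare_args(void) {\n    return tsvc_ip;\n}\n" by decide).trans (show render_prepare_fn "s4113" = "void *tsvc_prepare_args(void) {\n    return tsvc_ip;\n}\n" by decide).symm
    · exact (show pvPrepareFn "s4115" = "void *tsvc_prepare_args(void) {\n    return tsvc_ip;\n}\n" by decide).trans (show render_prepare_fn "s4115" = "void *tsvc_prepare_args(void) {\n    return tsvc_ip;\n}\n" by decide).symm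
    · exact (show pvPrepareFn "vag" = "void *tsvc_prepare_args(void) {\n    return tsvc_ip;\n}\n" by decide).trans (show render_prepare_fn "vag" = "void *tsvc_prepare_args(void) {\n    return tsvc_ip;\n}\n" by decide).symm
    · exact (show pvPrepareFn "vas" = "void *tsvc_prepare_args(void) {\n    return tsvc_ip;\n}\n" by decide).trans (show render_prepare_fn "vas" = "void *tsvc_prepare_args(void) {\n    return tsvc_ip;\n}\n" by decide).symm
    · exact (show pvPrepareFn "s174" = "void *tsvc_prepare_args(void) {\n    static struct {int a;} args = {LEN_1D/2};\n    return &args;\n}\n" by decide).trans (show render_prepare_fn "s174" = "void *tsvc_prepare_args(void) {\n    static struct {int a;} args = {LEN_1D/2};\n    return &args;\n}\n" by decide).symm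
    · exact (show pvPrepareFn "s242" = "void *tsvc_prepare_args(void) {\n    static struct {real_t a; real_t b;} args;\n    args.a = tsvc_s1;\n    args.b = tsvc_s2;\n    return &args;\n}\n" by decide).trans (show render_prepare_fn "s242" = "void *tsvc_prepare_args(void) {\n    static struct {real_t a; real_t b;} args;\n    args.a = tsvc_s1;\n    args.b = tsvc_s2;\n    return &args;\n}\n" by decide).symm
    · exact (show pvPrepareFn "s4112" = "void *tsvc_prepare_args(void) {\n    static struct {int *a; real_t b;} args;\n    args.a = tsvc_ip;\n    args.b = tsvc_s1;\n    return &args;\n}\n" by decide).trans (show render_prepare_fn "s4112" = "void *tsvc_prepare_args(void) {\n    static struct {int *a; real_t b;} args;\n    args.a = tsvc_ip;\n    args.b = tsvc_s1;\n    return &args;\n}\n" by decide).symm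
    · exact (show pvPrepareFn "s4114" = "void *tsvc_prepare_args(void) {\n    static struct {int *a; int b;} args;\n    args.a = tsvc_ip;\n    args.b = tsvc_n1;\n    return &args;\n}\n" by decide).trans (show render_prepare_fn "s4114" = "void *tsvc_prepare_args(void) {\n    static struct {int *a; int b;} args;\n    args.a = tsvc_ip;\n    args.b = tsvc_n1;\n    return &args;\n}\n" by decide).symm
    · exact (show pvPrepareFn "s4116" = "void *tsvc_prepare_args(void) {\n    static struct {int *a; int b; int c;} args;\n    args.a = tsvc_ip;\n    args.b = LEN_2D/2;\n    args.c = tsvc_n1;\n    return &args;\n}\n" by decide).trans (show render_prepare_fn "s4116" = "void *tsvc_prepare_args(void) {\n    static struct {int *a; int b; int c;} args;\n    args.a = tsvc_ip;\n    args.b = LEN_2D/2;\n    args.c = tsvc_n1;\n    return &args;\n}\n" by decide).symm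
  · simp [pvKeys] at h
    obtain ⟨h1, h2, h3, h4, h5, h6, h7, h8, h9, h10, h11, h12, h13, h14, h15, h16, h17, h18, h19, h20, h21⟩ := h
    have hsk : pvStruct.keys = ["s122", "s172", "s174", "s242", "s4112", "s4114", "s4116"] := by decide
    have hs : pvStruct.get? loop = none := by
      rw [PySem.Dict.get?_eq_none_iff_not_mem_keys, hsk]
      simp [h1, h2, h17, h18, h19, h20, h21]
    have hrk : pvRet.keys = ["s162", "s171", "s175", "s318", "s272", "s2710", "s332", "vpvts", "s353", "s491", "s4113", "s4115", "vag", "vas"] := by decide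
    have hr : pvRet.getD loop "NULL" = "NULL" := by
      apply PySem.Dict.getD_of_not_contains
      rw [PySem.Dict.contains_eq_decide_mem_keys, hrk]
      simp [h3, h4, h5, h6, h7, h8, h9, h10, h11, h12, h13, h14, h15, h16]
    rw [pvPrepareFn, hs]
    simp only [hr]
    simp [render_prepare_fn, PySem.Set.contains, PySem.Set.ofList, PySem.Set.add,
      h1, h2, h3, h4, h5, h6, h7, h8, h9, h10, h11, h12, h13, h14, h15, h16, h17, h18, h19, h20, h21]
    decide

theorem pvLast (l : List String) (hd : String) :
    PySem.List.pyGetD (hd :: l) (-1) "" = l.getLastD hd := by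
  rcases eq_or_ne l [] with rfl | h
  · simp [PySem.List.pyGetD, PySem.List.pyGet?, PySem.List.pyIdx?]
  · rw [PySem.List.pyGetD_neg_one _ _ (by simp), List.getLast_cons h,
      List.getLastD_eq_getLast?, List.getLast?_eq_some_getLast h]
    rfl

theorem join_empty (l : List (List Char)) : PySem.Chars.join [] l = l.flatten := by
  induction l with
  | nil => simp [PySem.Chars.join_nil]
  | cons a l ih =>
    cases l with
    | nil => simp [PySem.Chars.join_singleton]
    | cons b r => rw [PySem.Chars.join_cons_cons]; simp [ih]

-- ===== VERDICT (by name: the statement is the Claim_ definition above) =====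
set_option maxRecDepth 40000 in
theorem assemble_file_spec : Claim_equal_assemble_file := by
  intro loop func_src helpers _
  unfold Spec_assemble_file assemble_file assemble_file_alt
  simp only [List.singleton_append, pvHeaderA, pvHeaderB, pvLast]
  rw [← prep_eq]
  rcases em (PySem.Str.strip ((helpers.filter (fun h => h ≠ "")).getLastD "#include <math.h>\n#include \"../common.h\"\n#include \"../array_defs.h\"\n#include \"../single_support.h\"\n#include \"../tsvc_measure.h\"\n\n") ≠ "") with hc | hc
  · rw [if_pos hc, if_pos hc]
    apply String.toList_injective
    simp [PySem.Str.toList_join, join_empty, List.append_assoc]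
  · rw [if_neg hc, if_neg hc]
    apply String.toList_injective
    simp [PySem.Str.toList_join, join_empty, List.append_assoc]
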